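-- pv_equiv track=rewrite | github.com/SoensJakob/Team-Project-Twister-2.0 | webapp/Back-end/TwisterBoard/main.py | get_row_column
-- ===== SOURCE A (Python) =====
-- buttons = [[4, 17,27,22,10,9 ], [11,0, 5, 6, 13,19], [26,21,20,16,12,1 ], [7, 8, 25,24,23,18]]
--
-- def get_row_column(button):
--     for x in range(len(buttons)):
--         b_list = buttons[x]
--         try:
--             index = b_list.index(button)
--             return [x, index]
--         except:
--             pass
-- ===== SOURCE B (Python) =====
-- # Same board flattened row-major; one flat lookup + divmod replaces the per-row scan.
-- FLAT = [4, 17, 27, 22, 10, 9,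
--         11, 0, 5, 6, 13, 19,
--         26, 21, 20, 16, 12, 1,
--         7, 8, 25, 24, 23, 18]
--
-- def get_row_column(button):
--     if button in FLAT:
--         pos = FLAT.index(button)
--         return [pos // 6, pos % 6]
--     return None
-- ===== Notes on version B (the rewrite author's own statement) =====
-- stated objective: simpler
-- what changed: Replaces the per-row loop with manual row counter and try/except by a single flat row-major list lookup plus closed-form divmod (pos // 6, pos % 6).
import Mathlib
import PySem

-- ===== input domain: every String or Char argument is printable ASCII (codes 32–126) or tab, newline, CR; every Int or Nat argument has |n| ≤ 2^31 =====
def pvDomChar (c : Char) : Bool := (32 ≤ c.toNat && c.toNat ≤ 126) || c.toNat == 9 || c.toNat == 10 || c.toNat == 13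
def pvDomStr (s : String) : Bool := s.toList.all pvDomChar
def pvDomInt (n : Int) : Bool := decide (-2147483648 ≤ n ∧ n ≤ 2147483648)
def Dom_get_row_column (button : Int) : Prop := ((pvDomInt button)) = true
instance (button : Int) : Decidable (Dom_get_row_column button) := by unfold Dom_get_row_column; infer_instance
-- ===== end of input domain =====

-- B replaces A's row-by-row scan (try/except around list.index) by one flat lookup plus divmod; simpler, same cost.

-- ===== PORT A =====
def pvButtons : List (List Int) :=
  [[4, 17, 27, 22, 10, 9], [11, 0, 5, 6, 13, 19], [26, 21, 20, 16, 12, 1], [7, 8, 25, 24, 23, 18]]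

-- the for-loop over range(len(buttons)): x is the row counter, early return on a successful index
def pvLoopA (button : Int) (x : Int) : List (List Int) → Option (List Int)
  | [] => none
  | b_list :: rest =>
    match PySem.List.index? b_list button with
    | some index => some [x, (index : Int)]
    | none => pvLoopA button (x + 1) rest

def get_row_column (button : Int) : Option (List Int) :=
  pvLoopA button 0 pvButtons

-- ===== PORT B =====
def pvFlat : List Int :=
  [4, 17, 27, 22, 10, 9, 11, 0, 5, 6, 13, 19, 26, 21, 20, 16, 12, 1, 7, 8, 25, 24, 23, 18]

def get_row_column_alt (button : Int) : Option (List Int) :=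
  if button ∈ pvFlat then
    match PySem.List.index? pvFlat button with
    | some pos => some [PySem.Int.floordiv (pos : Int) 6, PySem.Int.mod (pos : Int) 6]
    | none => none
  else
    none

-- ===== PRECONDITION & SPEC =====
def Spec_get_row_column (button : Int) (out : Option (List Int)) : Prop := out = get_row_column_alt button
instance (button : Int) (out : Option (List Int)) : Decidable (Spec_get_row_column button out) := by unfold Spec_get_row_column; infer_instance

-- ===== CLAIM (what is proved, stated in full; the proofs are below) =====
def Claim_equal_get_row_column : Prop := ∀ (button : Int), Dom_get_row_column button → Spec_get_row_column button (get_row_column button)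

-- ===== LEMMAS AND PROOFS =====

-- ===== VERDICT (by name: the statement is the Claim_ definition above) =====
theorem get_row_column_spec : Claim_equal_get_row_column := by
  intro button _
  unfold Spec_get_row_column
  by_cases h : button ∈ pvFlat
  · simp only [pvFlat, List.mem_cons, List.not_mem_nil, or_false] at h
    rcases h with rfl|rfl|rfl|rfl|rfl|rfl|rfl|rfl|rfl|rfl|rfl|rfl|rfl|rfl|rfl|rfl|rfl|rfl|rfl|rfl|rfl|rfl|rfl|rfl <;> decide
  · have n1 : PySem.List.index? ([4, 17, 27, 22, 10, 9] : List Int) button = none :=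
      (PySem.List.index?_eq_none_iff _ _).mpr (fun hm => h (by simp [pvFlat]; simp at hm; tauto))
    have n2 : PySem.List.index? ([11, 0, 5, 6, 13, 19] : List Int) button = none :=
      (PySem.List.index?_eq_none_iff _ _).mpr (fun hm => h (by simp [pvFlat]; simp at hm; tauto))
    have n3 : PySem.List.index? ([26, 21, 20, 16, 12, 1] : List Int) button = none :=
      (PySem.List.index?_eq_none_iff _ _).mpr (fun hm => h (by simp [pvFlat]; simp at hm; tauto))
    have n4 : PySem.List.index? ([7, 8, 25, 24, 23, 18] : List Int) button = none :=
      (PySem.List.index?_eq_none_iff _ _).mpr (fun hm => h (by simp [pvFlat]; simp at hm; tauto))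
    simp only [get_row_column, get_row_column_alt, pvButtons, pvLoopA, n1, n2, n3, n4]
    simp [h]
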